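-- pv_equiv track=rewrite | github.com/jayho-k/TIL | PS/test/Nst_창문닦이.py | make_cost_table
-- ===== SOURCE A (Python) =====
-- ycost=2
--
-- xcost=1
--
-- def make_cost_table(n):
--     cost_table = [[0]*(n+1) for _ in range(n+1)]
--     for i in range(2,n+1):
--         cost_table[1][i]=-xcost+cost_table[1][i-1]
--
--     for y in range(2,n+1):
--         for x in range(1,n+1):
--             cost_table[y][x]=cost_table[y-1][x]-ycost
--     return cost_table
-- ===== SOURCE B (Python) =====
-- ycost = 2
--
-- xcost = 1
--
-- def make_cost_table(n):
--     # closed form: cell (y,x) with y>=1 and x>=1 costs -(x-1)*xcost - (y-1)*ycost,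
--     # the top row and left column stay 0
--     return [[-(x - 1) * xcost - (y - 1) * ycost if y >= 1 and x >= 1 else 0
--              for x in range(n + 1)]
--             for y in range(n + 1)]
-- ===== Notes on version B (the rewrite author's own statement) =====
-- stated objective: simpler
-- what changed: Replaced the sequential recurrence propagation (row-1 running subtraction, then per-row -ycost recurrence copying the previous row) with a single comprehension filling every cell directly from the closed form -(x-1)*xcost - (y-1)*ycost, with row 0 and column 0 left at 0.
import Mathlib
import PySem

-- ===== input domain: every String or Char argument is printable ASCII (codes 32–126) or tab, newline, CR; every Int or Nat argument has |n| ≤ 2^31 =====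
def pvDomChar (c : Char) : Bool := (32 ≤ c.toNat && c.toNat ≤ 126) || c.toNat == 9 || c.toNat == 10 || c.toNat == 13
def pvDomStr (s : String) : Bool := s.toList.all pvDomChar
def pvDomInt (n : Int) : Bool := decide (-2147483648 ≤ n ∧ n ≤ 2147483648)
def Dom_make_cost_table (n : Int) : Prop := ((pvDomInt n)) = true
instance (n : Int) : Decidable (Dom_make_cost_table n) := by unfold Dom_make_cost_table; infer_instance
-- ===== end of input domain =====

-- B replaces A's sequential recurrence with a direct closed-form fill of each cell (objective: simpler).


def ycost : Int := 2

def xcost : Int := 1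

-- ===== PORT A =====
-- the two 'let cost_table := …' stages of the Python are written as directly nested stages
def make_cost_table (n : Int) : List (List Int) :=
  (PySem.List.pyRange 2 (n+1) 1).foldl
    (fun t y =>
      (PySem.List.pyRange 1 (n+1) 1).foldl
        (fun t x =>
          PySem.List.pySetD t y
            (PySem.List.pySetD (PySem.List.pyGetD t y []) x
              (PySem.List.pyGetD (PySem.List.pyGetD t (y-1) []) x 0 - ycost))) t)
    ((PySem.List.pyRange 2 (n+1) 1).foldl
      (fun t i =>
        PySem.List.pySetD t 1
          (PySem.List.pySetD (PySem.List.pyGetD t 1 []) i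
            (-xcost + PySem.List.pyGetD (PySem.List.pyGetD t 1 []) (i-1) 0)))
      (List.replicate (n+1).toNat (List.replicate (n+1).toNat (0:Int))))

-- ===== PORT B =====
def make_cost_table_alt (n : Int) : List (List Int) :=
  (PySem.List.pyRange 0 (n+1) 1).map (fun y =>
    (PySem.List.pyRange 0 (n+1) 1).map (fun x =>
      if 1 ≤ y ∧ 1 ≤ x then -(x-1)*xcost - (y-1)*ycost else 0))

-- ===== PRECONDITION & SPEC =====
def Spec_make_cost_table (n : Int) (out : List (List Int)) : Prop := out = make_cost_table_alt n
instance (n : Int) (out : List (List Int)) : Decidable (Spec_make_cost_table n out) := by unfold Spec_make_cost_table; infer_instance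

-- ===== CLAIM (what is proved, stated in full; the proofs are below) =====
def Claim_equal_make_cost_table : Prop := ∀ (n : Int), Dom_make_cost_table n → Spec_make_cost_table n (make_cost_table n)

-- ===== LEMMAS AND PROOFS =====

-- pvTable m g : the m×m table whose (y,x) entry is g y x
def pvTable (m : Nat) (g : Nat → Nat → Int) : List (List Int) :=
  (List.range m).map (fun y => (List.range m).map (g y))

-- row 1 after loop 1 has processed the indices i < k
def g1 (k : Int) (y x : Nat) : Int :=
  if y = 1 ∧ 2 ≤ x ∧ (x:Int) < k then 1 - (x:Int) else 0

-- table after loop 2 has processed the rows y < k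
def g2 (k : Int) (y x : Nat) : Int :=
  if 1 ≤ y ∧ 1 ≤ x ∧ (y:Int) < k then (1 - (x:Int)) - ((y:Int)-1)*2 else 0

-- row y of loop 2, after the inner loop has processed the columns x < j
def gin (y j : Int) (Y x : Nat) : Int :=
  if (Y:Int) = y ∧ 1 ≤ x ∧ (x:Int) < j then (1 - (x:Int)) - (y-1)*2 else g2 y Y x

-- the final closed-form table (= B)
def gF (y x : Nat) : Int :=
  if 1 ≤ y ∧ 1 ≤ x then -((x:Int)-1)*xcost - ((y:Int)-1)*ycost else 0

theorem pvTable_congr (m : Nat) (g g' : Nat → Nat → Int)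
    (h : ∀ y < m, ∀ x < m, g y x = g' y x) : pvTable m g = pvTable m g' := by
  unfold pvTable
  refine List.map_congr_left (fun y hy => ?_)
  refine List.map_congr_left (fun x hx => ?_)
  exact h y (List.mem_range.mp hy) x (List.mem_range.mp hx)

theorem set_map_range {α : Type} (m k : Nat) (g : Nat → α) (v : α) :
    ((List.range m).map g).set k v = (List.range m).map (fun i => if i = k then v else g i) := by
  apply List.ext_getElem
  · simp
  · intro i h1 h2
    simp only [List.getElem_set, List.getElem_map, List.getElem_range]
    by_cases hik : i = k
    · simp [hik]
    · simp [Ne.symm hik, hik]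

theorem getD_map_range' {α : Type} (m k : Nat) (g : Nat → α) (d : α) (hk : k < m) :
    ((List.range m).map g).getD k d = g k := by
  rw [List.getD_eq_getElem?_getD]
  simp [hk]

theorem pyGetD_table (m : Nat) (g : Nat → Nat → Int) (y : Int) (hy0 : 0 ≤ y) (hym : y < (m:Int)) :
    PySem.List.pyGetD (pvTable m g) y [] = (List.range m).map (g y.toNat) := by
  rw [PySem.List.pyGetD_of_nonneg _ _ hy0]
  unfold pvTable
  exact getD_map_range' m y.toNat _ [] (by omega)

theorem pySetD_table (m : Nat) (g : Nat → Nat → Int) (y : Int) (hy0 : 0 ≤ y) (r : List Int) :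
    PySem.List.pySetD (pvTable m g) y r
      = (List.range m).map (fun Y => if Y = y.toNat then r else (List.range m).map (g Y)) := by
  rw [PySem.List.pySetD_of_nonneg _ _ hy0]
  unfold pvTable
  exact set_map_range m y.toNat _ r

-- the initial table of zeros is pvTable m (g1 2)
theorem init_table (m : Nat) :
    List.replicate m (List.replicate m (0:Int)) = pvTable m (g1 2) := by
  unfold pvTable
  apply List.ext_getElem
  · simp
  · intro i h1 h2
    simp only [List.getElem_replicate, List.getElem_map, List.getElem_range]
    apply List.ext_getElem
    · simp
    · intro x hx1 hx2
      simp only [List.getElem_replicate, List.getElem_map, List.getElem_range]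
      unfold g1
      split_ifs <;> omega

-- one step of loop 1
theorem loop1_step (n : Int) (m : Nat) (hm : (m:Int) = n+1) (k : Int) (h2 : 2 ≤ k) (hk : k < n+1) :
    PySem.List.pySetD (pvTable m (g1 k)) 1
      (PySem.List.pySetD (PySem.List.pyGetD (pvTable m (g1 k)) 1 []) k
        (-xcost + PySem.List.pyGetD (PySem.List.pyGetD (pvTable m (g1 k)) 1 []) (k-1) 0))
    = pvTable m (g1 (k+1)) := by
  rw [pyGetD_table m (g1 k) 1 (by omega) (by omega)]
  have hval : -xcost + PySem.List.pyGetD ((List.range m).map (g1 k (1:Int).toNat)) (k-1) 0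
      = 1 - k := by
    rw [PySem.List.pyGetD_of_nonneg _ _ (by omega),
        getD_map_range' m (k-1).toNat _ 0 (by omega)]
    unfold g1 xcost
    split_ifs <;> omega
  rw [hval, PySem.List.pySetD_of_nonneg _ _ (by omega : (0:Int) ≤ k), set_map_range,
      pySetD_table m (g1 k) 1 (by omega)]
  unfold pvTable
  refine List.map_congr_left (fun y hy => ?_)
  have hy' : y < m := List.mem_range.mp hy
  by_cases hy1 : y = (1:Int).toNat
  · rw [if_pos hy1]
    refine List.map_congr_left (fun x hx => ?_)
    have hx' : x < m := List.mem_range.mp hx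
    unfold g1
    split_ifs <;> omega
  · rw [if_neg hy1]
    refine List.map_congr_left (fun x hx => ?_)
    unfold g1
    split_ifs <;> first | rfl | omega

-- loop 1, from index k to the end
theorem loop1 (n : Int) (m : Nat) (hm : (m:Int) = n+1) :
    ∀ (d : Nat) (k : Int), 2 ≤ k → (n+1-k).toNat = d →
    (PySem.List.pyRange k (n+1) 1).foldl
      (fun t i =>
        PySem.List.pySetD t 1
          (PySem.List.pySetD (PySem.List.pyGetD t 1 []) i
            (-xcost + PySem.List.pyGetD (PySem.List.pyGetD t 1 []) (i-1) 0))) (pvTable m (g1 k))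
      = pvTable m (g1 (n+1)) := by
  intro d
  induction d with
  | zero =>
    intro k h2 hd
    rw [PySem.List.pyRange_one_eq_nil (show n+1 ≤ k by omega)]
    simp only [List.foldl_nil]
    refine pvTable_congr m _ _ (fun y hy x hx => ?_)
    unfold g1
    split_ifs <;> first | rfl | omega
  | succ d ih =>
    intro k h2 hd
    rw [PySem.List.pyRange_one_cons (show k < n+1 by omega)]
    simp only [List.foldl_cons]
    rw [loop1_step n m hm k h2 (by omega)]
    exact ih (k+1) (by omega) (by omega)

-- one step of the inner loop of loop 2
theorem loop2_inner_step (n : Int) (m : Nat) (hm : (m:Int) = n+1) (y : Int) (hy2 : 2 ≤ y)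
    (hyn : y < n+1) (j : Int) (hj1 : 1 ≤ j) (hjn : j < n+1) :
    PySem.List.pySetD (pvTable m (gin y j)) y
      (PySem.List.pySetD (PySem.List.pyGetD (pvTable m (gin y j)) y []) j
        (PySem.List.pyGetD (PySem.List.pyGetD (pvTable m (gin y j)) (y-1) []) j 0 - ycost))
    = pvTable m (gin y (j+1)) := by
  rw [pyGetD_table m (gin y j) (y-1) (by omega) (by omega),
      pyGetD_table m (gin y j) y (by omega) (by omega)]
  have hval : PySem.List.pyGetD ((List.range m).map (gin y j (y-1).toNat)) j 0 - ycost
      = (1 - j) - (y-1)*2 := by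
    rw [PySem.List.pyGetD_of_nonneg _ _ (by omega),
        getD_map_range' m j.toNat _ 0 (by omega)]
    unfold gin g2 ycost
    split_ifs <;> omega
  rw [hval, PySem.List.pySetD_of_nonneg _ _ (by omega : (0:Int) ≤ j), set_map_range,
      pySetD_table m (gin y j) y (by omega)]
  unfold pvTable
  refine List.map_congr_left (fun Y hY => ?_)
  have hY' : Y < m := List.mem_range.mp hY
  by_cases hYy : Y = y.toNat
  · rw [if_pos hYy]
    refine List.map_congr_left (fun x hx => ?_)
    have hx' : x < m := List.mem_range.mp hx
    unfold gin g2
    split_ifs <;> omega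
  · rw [if_neg hYy]
    refine List.map_congr_left (fun x hx => ?_)
    unfold gin g2
    split_ifs <;> first | rfl | omega

-- the inner loop of loop 2, from column j to the end
theorem loop2_inner (n : Int) (m : Nat) (hm : (m:Int) = n+1) (y : Int) (hy2 : 2 ≤ y)
    (hyn : y < n+1) :
    ∀ (d : Nat) (j : Int), 1 ≤ j → (n+1-j).toNat = d →
    (PySem.List.pyRange j (n+1) 1).foldl
      (fun t x =>
        PySem.List.pySetD t y
          (PySem.List.pySetD (PySem.List.pyGetD t y []) x
            (PySem.List.pyGetD (PySem.List.pyGetD t (y-1) []) x 0 - ycost))) (pvTable m (gin y j))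
      = pvTable m (gin y (n+1)) := by
  intro d
  induction d with
  | zero =>
    intro j hj hd
    rw [PySem.List.pyRange_one_eq_nil (show n+1 ≤ j by omega)]
    simp only [List.foldl_nil]
    refine pvTable_congr m _ _ (fun Y hY x hx => ?_)
    unfold gin
    split_ifs <;> first | rfl | omega
  | succ d ih =>
    intro j hj hd
    rw [PySem.List.pyRange_one_cons (show j < n+1 by omega)]
    simp only [List.foldl_cons]
    rw [loop2_inner_step n m hm y hy2 hyn j hj (by omega)]
    exact ih (j+1) (by omega) (by omega)

-- loop 2, from row k to the end
theorem loop2 (n : Int) (m : Nat) (hm : (m:Int) = n+1) :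
    ∀ (d : Nat) (k : Int), 2 ≤ k → (n+1-k).toNat = d →
    (PySem.List.pyRange k (n+1) 1).foldl
      (fun t y =>
        (PySem.List.pyRange 1 (n+1) 1).foldl
          (fun t x =>
            PySem.List.pySetD t y
              (PySem.List.pySetD (PySem.List.pyGetD t y []) x
                (PySem.List.pyGetD (PySem.List.pyGetD t (y-1) []) x 0 - ycost))) t)
      (pvTable m (g2 k))
      = pvTable m (g2 (n+1)) := by
  intro d
  induction d with
  | zero =>
    intro k h2 hd
    rw [PySem.List.pyRange_one_eq_nil (show n+1 ≤ k by omega)]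
    simp only [List.foldl_nil]
    refine pvTable_congr m _ _ (fun y hy x hx => ?_)
    unfold g2
    split_ifs <;> first | rfl | omega
  | succ d ih =>
    intro k h2 hd
    rw [PySem.List.pyRange_one_cons (show k < n+1 by omega)]
    simp only [List.foldl_cons]
    have hstart : pvTable m (g2 k) = pvTable m (gin k 1) := by
      refine pvTable_congr m _ _ (fun Y hY x hx => ?_)
      unfold gin g2
      split_ifs <;> first | rfl | omega
    have hend : pvTable m (gin k (n+1)) = pvTable m (g2 (k+1)) := by
      refine pvTable_congr m _ _ (fun Y hY x hx => ?_)
      unfold gin g2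
      split_ifs <;> first | rfl | omega
    rw [hstart, loop2_inner n m hm k h2 (by omega) (n+1-1).toNat 1 (by omega) rfl, hend]
    exact ih (k+1) (by omega) (by omega)

-- the state after loop 1 is the state before loop 2
theorem mid_table (n : Int) (m : Nat) (hm : (m:Int) = n+1) :
    pvTable m (g1 (n+1)) = pvTable m (g2 2) := by
  refine pvTable_congr m _ _ (fun y hy x hx => ?_)
  unfold g1 g2
  split_ifs <;> omega

-- B is the closed-form table
theorem alt_eq_table (n : Int) : make_cost_table_alt n = pvTable (n+1).toNat gF := by
  unfold make_cost_table_alt pvTable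
  rw [PySem.List.pyRange_one, show n+1-0 = n+1 from by ring, List.map_map]
  refine List.map_congr_left (fun y hy => ?_)
  have hy' : y < (n+1).toNat := List.mem_range.mp hy
  simp only [Function.comp_apply, zero_add, List.map_map]
  refine List.map_congr_left (fun x hx => ?_)
  have hx' : x < (n+1).toNat := List.mem_range.mp hx
  simp only [Function.comp_apply]
  unfold gF xcost ycost
  split_ifs <;> first | rfl | omega

-- A is the closed-form table
theorem a_eq_table (n : Int) (h : 0 ≤ n + 1) : make_cost_table n = pvTable (n+1).toNat gF := by
  have hm : (((n+1).toNat : Nat) : Int) = n+1 := by omega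
  unfold make_cost_table
  rw [init_table, loop1 n (n+1).toNat hm (n+1-2).toNat 2 (by omega) rfl,
      mid_table n (n+1).toNat hm, loop2 n (n+1).toNat hm (n+1-2).toNat 2 (by omega) rfl]
  refine pvTable_congr _ _ _ (fun y hy x hx => ?_)
  unfold g2 gF xcost ycost
  split_ifs <;> omega

-- ===== VERDICT (by name: the statement is the Claim_ definition above) =====
theorem make_cost_table_spec : Claim_equal_make_cost_table := by
  intro n _
  unfold Spec_make_cost_table
  by_cases h : 0 ≤ n + 1
  · rw [a_eq_table n h, alt_eq_table n]
  · unfold make_cost_table make_cost_table_alt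
    rw [show (n+1).toNat = 0 from by omega,
        PySem.List.pyRange_one_eq_nil (show n+1 ≤ (2:Int) by omega),
        PySem.List.pyRange_one_eq_nil (show n+1 ≤ (0:Int) by omega)]
    simp
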